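-- pv_equiv track=rewrite | github.com/virresh/rl_q_learning_sarsa | Runner.py | find_converge_time
-- ===== SOURCE A (Python) =====
-- def find_converge_time(values):
-- 	converged_val = min(values)
-- 	for i in range(10, len(values)):
-- 		found = True
-- 		for k in values[i-5:i]:
-- 			if k != converged_val:
-- 				found = False
-- 				break
-- 		if found:
-- 			return i-10
-- 	return len(values)
-- ===== SOURCE B (Python) =====
-- def find_converge_time(values):
--     converged_val = min(values)
--     streak = 0
--     for j, v in enumerate(values[:len(values) - 1]):
--         streak = streak + 1 if v == converged_val else 0
--         if j >= 9 and streak >= 5: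
--             return j - 9
--     return len(values)
-- ===== Notes on version B (the rewrite author's own statement) =====
-- stated objective: faster
-- what changed: Replaces the nested 5-element window rescan at every position with a single linear pass maintaining a run-length (streak) counter of consecutive minimum values.
import Mathlib
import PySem

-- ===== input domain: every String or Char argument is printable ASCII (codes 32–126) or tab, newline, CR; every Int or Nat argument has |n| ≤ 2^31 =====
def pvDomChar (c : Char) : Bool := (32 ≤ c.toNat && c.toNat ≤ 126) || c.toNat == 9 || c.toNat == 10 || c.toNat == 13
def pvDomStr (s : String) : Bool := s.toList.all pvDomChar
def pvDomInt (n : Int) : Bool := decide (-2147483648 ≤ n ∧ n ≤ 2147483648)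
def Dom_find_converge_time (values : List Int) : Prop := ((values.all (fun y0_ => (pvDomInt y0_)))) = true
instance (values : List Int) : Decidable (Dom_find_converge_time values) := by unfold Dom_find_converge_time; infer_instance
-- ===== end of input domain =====

-- B replaces A's per-position 5-element window rescan with a single pass keeping a
-- run-length (streak) counter of consecutive minimum values (objective: alternative).

-- ===== PORT A =====
-- inner 'for k in values[i-5:i]' loop with the found flag and break
def pvWinAll (window : List Int) (m : Int) : Bool :=
  match window with
  | [] => true
  | k :: rest => if k ≠ m then false else pvWinAll rest m

-- 'for i in range(10, len(values))' with early return
def pvALoop (vs : List Int) (m : Int) (i : Nat) : Int :=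
  if i < vs.length then
    if pvWinAll (PySem.List.slice vs (some ((i : Int) - 5)) (some (i : Int))) m then
      (i : Int) - 10
    else pvALoop vs m (i + 1)
  else (vs.length : Int)
termination_by vs.length - i

def find_converge_time (values : List Int) : Int :=
  match PySem.List.min? values (fun x => x) with
  | none => 0   -- unreachable: Python's min([]) raises ValueError; excluded by Pre_
  | some m => pvALoop values m 10

-- ===== PORT B =====
-- 'for j, v in enumerate(values[:len(values)-1])' with the streak counter and early return
def pvBLoop (m : Int) (j streak : Nat) (rem : List Int) (n : Nat) : Int :=
  match rem with
  | [] => (n : Int)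
  | v :: rest =>
    let s' := if v = m then streak + 1 else 0
    if 9 ≤ j ∧ 5 ≤ s' then (j : Int) - 9
    else pvBLoop m (j + 1) s' rest n

def find_converge_time_alt (values : List Int) : Int :=
  match PySem.List.min? values (fun x => x) with
  | none => 0   -- unreachable: Python's min([]) raises ValueError; excluded by Pre_
  | some m => pvBLoop m 0 0 (values.take (values.length - 1)) values.length

-- ===== PRECONDITION & SPEC =====
-- Pre_ excludes only the empty list, on which Python's min raises ValueError.
def Pre_find_converge_time (values : List Int) : Prop := values ≠ []
instance (values : List Int) : Decidable (Pre_find_converge_time values) := by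
  unfold Pre_find_converge_time; infer_instance

def pvWitness_find_converge_time : List Int := [3, 1, 4, 1, 5, 9, 2, 6, 1, 1, 1, 1, 1, 1]

def Spec_find_converge_time (values : List Int) (out : Int) : Prop := out = find_converge_time_alt values
instance (values : List Int) (out : Int) : Decidable (Spec_find_converge_time values out) := by unfold Spec_find_converge_time; infer_instance

-- ===== CLAIM (what is proved, stated in full; the proofs are below) =====
def Claim_equal_find_converge_time : Prop := ∀ (values : List Int), Dom_find_converge_time values → Pre_find_converge_time values → Spec_find_converge_time values (find_converge_time values)

-- ===== LEMMAS AND PROOFS =====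

-- streak value after processing j elements: run-length of m ending just before index j
def pvRun (vs : List Int) (m : Int) : Nat → Nat
  | 0 => 0
  | j + 1 => if vs.getD j 0 = m then pvRun vs m j + 1 else 0

theorem pvWinAll_iff (w : List Int) (m : Int) :
    pvWinAll w m = true ↔ ∀ x ∈ w, x = m := by
  induction w with
  | nil => simp [pvWinAll]
  | cons k rest ih =>
    by_cases h : k = m <;> simp [pvWinAll, h, ih]

theorem pvRun_ge (vs : List Int) (m : Int) :
    ∀ k j, (k ≤ pvRun vs m j) ↔ (k ≤ j ∧ ∀ u < k, vs.getD (j - 1 - u) 0 = m) := by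
  intro k
  induction k with
  | zero => intro j; simp
  | succ k ih =>
    intro j
    cases j with
    | zero => simp [pvRun]
    | succ j =>
      by_cases h : vs.getD j 0 = m
      · rw [pvRun, if_pos h]
        constructor
        · intro hk
          have := (ih j).mp (by omega)
          refine ⟨by omega, ?_⟩
          intro u hu
          cases u with
          | zero => simpa using h
          | succ u =>
            have := this.2 u (by omega)
            have he : j + 1 - 1 - (u + 1) = j - 1 - u := by omega
            rw [he]; exact this
        · rintro ⟨hj, hall⟩
          have : k ≤ pvRun vs m j := by
            apply (ih j).mpr
            refine ⟨by omega, ?_⟩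
            intro u hu
            have := hall (u + 1) (by omega)
            have he : j + 1 - 1 - (u + 1) = j - 1 - u := by omega
            rw [he] at this; exact this
          omega
      · rw [pvRun, if_neg h]
        constructor
        · omega
        · rintro ⟨hj, hall⟩
          exact absurd (by simpa using hall 0 (by omega)) h

-- A's window test at i = j+1 (with 9 ≤ j, j+1 ≤ n) equals 'streak after step j ≥ 5'
theorem pvWindow_iff_run (vs : List Int) (m : Int) (j : Nat)
    (h9 : 9 ≤ j) (hn : j + 1 ≤ vs.length) :
    (pvWinAll (PySem.List.slice vs (some (((j + 1 : Nat) : Int) - 5)) (some ((j + 1 : Nat) : Int))) m = true)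
      ↔ 5 ≤ pvRun vs m (j + 1) := by
  have hcast : (((j + 1 : Nat) : Int) - 5) = (((j - 4 : Nat) : Int)) := by
    push_cast [Nat.cast_sub (by omega : 4 ≤ j)]; ring
  rw [hcast, PySem.List.slice_natCast]
  have htk : j + 1 - (j - 4) = 5 := by omega
  rw [htk]
  rw [pvWinAll_iff]
  constructor
  · intro hall
    apply (pvRun_ge vs m 5 (j + 1)).mpr
    refine ⟨by omega, ?_⟩
    intro u hu
    have hidx : j - 4 + (4 - u) < vs.length := by omega
    have hmem : vs[j - 4 + (4 - u)] ∈ (vs.drop (j - 4)).take 5 := by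
      have : (4 - u) < ((vs.drop (j - 4)).take 5).length := by
        simp [List.length_take, List.length_drop]; omega
      have hg : ((vs.drop (j - 4)).take 5)[4 - u] = vs[j - 4 + (4 - u)] := by
        simp [List.getElem_take, List.getElem_drop]
      rw [← hg]; exact List.getElem_mem this
    have := hall _ hmem
    have he : j + 1 - 1 - u = j - 4 + (4 - u) := by omega
    rw [he, List.getD_eq_getElem vs 0 hidx]
    exact this
  · intro hrun x hx
    have hrun' := (pvRun_ge vs m 5 (j + 1)).mp hrun
    rw [List.mem_iff_getElem] at hx
    obtain ⟨u, hu, hxe⟩ := hx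
    have hu5 : u < 5 := by
      have := hu; simp [List.length_take, List.length_drop] at this; omega
    have hidx : j - 4 + u < vs.length := by omega
    have hg : ((vs.drop (j - 4)).take 5)[u] = vs[j - 4 + u] := by
      simp [List.getElem_take, List.getElem_drop]
    have := hrun'.2 (4 - u) (by omega)
    have he : j + 1 - 1 - (4 - u) = j - 4 + u := by omega
    rw [he, List.getD_eq_getElem vs 0 hidx] at this
    rw [← hxe, hg]; exact this

theorem pvBLoop_eq_pvALoop (vs : List Int) (m : Int) :
    ∀ j, pvBLoop m j (pvRun vs m j) ((vs.take (vs.length - 1)).drop j) vs.length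
          = pvALoop vs m (max (j + 1) 10) := by
  intro j
  by_cases hend : vs.length - 1 ≤ j
  case pos =>
    have hnil : (vs.take (vs.length - 1)).drop j = [] := by
      apply List.drop_eq_nil_of_le
      simp [List.length_take]; omega
    rw [hnil, pvBLoop]
    rw [pvALoop]
    have : ¬ (max (j + 1) 10 < vs.length) := by omega
    rw [if_neg this]
  case neg =>
    have hlt : j < vs.length - 1 := by omega
    -- peel one element off the B side
    have hjl : j < (vs.take (vs.length - 1)).length := by
      simp [List.length_take]; omega
    have hjv : j < vs.length := by omega
    have hcons : (vs.take (vs.length - 1)).drop j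
        = vs[j] :: (vs.take (vs.length - 1)).drop (j + 1) := by
      rw [List.drop_eq_getElem_cons hjl]
      congr 1
      simp [List.getElem_take]
    rw [hcons, pvBLoop]
    have hstep : (if vs[j] = m then pvRun vs m j + 1 else 0) = pvRun vs m (j + 1) := by
      rw [pvRun, List.getD_eq_getElem vs 0 hjv]
    simp only [hstep]
    by_cases hcond : 9 ≤ j ∧ 5 ≤ pvRun vs m (j + 1)
    case pos =>
      rw [if_pos hcond]
      have hm : max (j + 1) 10 = j + 1 := by omega
      rw [hm, pvALoop, if_pos (by omega : j + 1 < vs.length)]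
      rw [if_pos ((pvWindow_iff_run vs m j hcond.1 (by omega)).mpr hcond.2)]
      push_cast; ring
    case neg =>
      rw [if_neg hcond]
      have ih := pvBLoop_eq_pvALoop vs m (j + 1)
      rw [ih]
      by_cases h9 : 9 ≤ j
      case pos =>
        have hm : max (j + 1) 10 = j + 1 := by omega
        have hm2 : max (j + 2) 10 = j + 2 := by omega
        rw [hm, hm2]
        conv_rhs => rw [pvALoop]
        rw [if_pos (by omega : j + 1 < vs.length)]
        have hnw : ¬ (pvWinAll (PySem.List.slice vs (some (((j + 1 : Nat) : Int) - 5)) (some ((j + 1 : Nat) : Int))) m = true) := by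
          rw [pvWindow_iff_run vs m j h9 (by omega)]
          omega
        rw [if_neg (by exact_mod_cast hnw)]
      case neg =>
        have hm : max (j + 1) 10 = 10 := by omega
        have hm2 : max (j + 2) 10 = 10 := by omega
        rw [hm, hm2]
termination_by j => vs.length - j
decreasing_by omega

-- ===== VERDICT (by name: the statement is the Claim_ definition above) =====
theorem find_converge_time_spec : Claim_equal_find_converge_time := by
  intro values _ _
  unfold Spec_find_converge_time find_converge_time find_converge_time_alt
  cases h : PySem.List.min? values (fun x => x) with
  | none => rfl
  | some m =>
    have := pvBLoop_eq_pvALoop values m 0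
    simp only [List.drop_zero] at this
    have h10 : max (0 + 1) 10 = 10 := by norm_num
    rw [h10] at this
    show pvALoop values m 10 = pvBLoop m 0 0 (values.take (values.length - 1)) values.length
    exact this.symm
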